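-- pv_equiv track=rewrite | github.com/timneumann1/Senior-Thesis-m-general-sets | helperFunctions.py | decimal_to_m_plus_one_vector
-- ===== SOURCE A (Python) =====
-- def decimal_to_m_plus_one_vector(decim, m, q):
--     '''
--     Function that transforms a given decimal integer to a vector of size m+1 over an underlying field of order q
--
--     Input: decimal integer, integer parameter m and order of underlying field
--     Output: vector of size m+1 over underlying field
--     '''
--     qary = [None] * (m+1)
--     quotient: int
--     quotient = decim
--     for i in range(1,m+2):
--         qary[m+1-i] = int(quotient % q)
--         quotient = int(quotient // q)
--     return qary
-- ===== SOURCE B (Python) =====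
-- def decimal_to_m_plus_one_vector(decim, m, q):
--     '''Same conversion by divide-and-conquer: recursively split the m+1 digits into
--     a low half and a high half, each call returning (most-significant-first digits,
--     remaining quotient); the quotient left by the low half seeds the high half.'''
--     def go(d, n):
--         if n == 0:
--             return [], d
--         if n == 1:
--             return [int(d % q)], int(d // q)
--         k = n // 2
--         lo, d2 = go(d, k)
--         hi, d3 = go(d2, n - k)
--         return hi + lo, d3
--     n = m + 1
--     if n < 0:
--         n = 0
--     return go(decim, n)[0]
-- ===== Notes on version B (the rewrite author's own statement) =====
-- stated objective: alternative
-- what changed: B replaces A's linear indexed loop over a preallocated list by a divide-and-conquer recursion that splits the m+1 digits into a low half and a high half, each call returning (most-significant-first digit block, remaining quotient).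
import Mathlib
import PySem

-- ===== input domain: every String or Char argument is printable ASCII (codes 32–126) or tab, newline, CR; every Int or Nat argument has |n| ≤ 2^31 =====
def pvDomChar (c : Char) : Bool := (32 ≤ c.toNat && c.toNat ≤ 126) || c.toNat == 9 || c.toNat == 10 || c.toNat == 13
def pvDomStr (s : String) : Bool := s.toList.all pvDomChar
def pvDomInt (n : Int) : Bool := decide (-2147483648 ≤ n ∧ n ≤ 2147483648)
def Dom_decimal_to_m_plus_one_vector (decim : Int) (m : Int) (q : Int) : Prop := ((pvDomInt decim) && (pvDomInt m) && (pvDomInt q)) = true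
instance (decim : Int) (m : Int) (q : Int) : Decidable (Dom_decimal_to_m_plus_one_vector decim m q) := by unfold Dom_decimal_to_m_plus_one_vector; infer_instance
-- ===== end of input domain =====

-- B replaces A's linear indexed loop by a divide-and-conquer recursion over halves of
-- the digit vector, threading the quotient from the low half into the high half
-- (objective: alternative decomposition, same cost class).

-- ===== PORT A =====
-- qary = [None]*(m+1): modelled as a list of 0 placeholders; every slot is overwritten
-- by the loop before the list is returned, so the placeholder value never escapes.
def decimal_to_m_plus_one_vector (decim : Int) (m : Int) (q : Int) : List Int :=
  let qary : Array Int := Array.replicate (m + 1).toNat 0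
  let r := (PySem.List.pyRange 1 (m + 2) 1).foldl
    (fun (st : Array Int × Int) i =>
      (st.1.setIfInBounds (m + 1 - i).toNat (PySem.Int.mod st.2 q), PySem.Int.floordiv st.2 q))
    (qary, decim)
  r.1.toList

-- ===== PORT B =====
-- go(d, n): (most-significant-first digits of the n low digits of d, quotient after n divisions)
def goB (q : Int) (d : Int) (n : Nat) : List Int × Int :=
  if n = 0 then ([], d)
  else if n = 1 then ([PySem.Int.mod d q], PySem.Int.floordiv d q)
  else
    let k := n / 2
    let lo := goB q d k
    let hi := goB q lo.2 (n - k)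
    (hi.1 ++ lo.1, hi.2)
termination_by n
decreasing_by all_goals omega

def decimal_to_m_plus_one_vector_alt (decim : Int) (m : Int) (q : Int) : List Int :=
  (goB q decim (m + 1).toNat).1

-- ===== PRECONDITION & SPEC =====
-- A raises ZeroDivisionError exactly when q = 0 and the loop body runs (m ≥ 0); Pre_ excludes only that.
def Pre_decimal_to_m_plus_one_vector (decim : Int) (m : Int) (q : Int) : Prop := q ≠ 0 ∨ m < 0
instance (decim : Int) (m : Int) (q : Int) : Decidable (Pre_decimal_to_m_plus_one_vector decim m q) := by unfold Pre_decimal_to_m_plus_one_vector; infer_instance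
def pvWitness_decimal_to_m_plus_one_vector : Int × Int × Int := (5, 2, 3)
def Spec_decimal_to_m_plus_one_vector (decim : Int) (m : Int) (q : Int) (out : List Int) : Prop := out = decimal_to_m_plus_one_vector_alt decim m q
instance (decim : Int) (m : Int) (q : Int) (out : List Int) : Decidable (Spec_decimal_to_m_plus_one_vector decim m q out) := by unfold Spec_decimal_to_m_plus_one_vector; infer_instance

-- ===== CLAIM (what is proved, stated in full; the proofs are below) =====
def Claim_equal_decimal_to_m_plus_one_vector : Prop := ∀ (decim : Int) (m : Int) (q : Int), Dom_decimal_to_m_plus_one_vector decim m q → Pre_decimal_to_m_plus_one_vector decim m q → Spec_decimal_to_m_plus_one_vector decim m q (decimal_to_m_plus_one_vector decim m q)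

-- ===== LEMMAS AND PROOFS =====

-- low-order digits of d, n of them, least-significant first
def digitsLow (q : Int) : Int → Nat → List Int
  | _, 0 => []
  | d, n+1 => PySem.Int.mod d q :: digitsLow q (PySem.Int.floordiv d q) n

-- n-fold floor quotient
def iterQ (q : Int) : Int → Nat → Int
  | d, 0 => d
  | d, n+1 => iterQ q (PySem.Int.floordiv d q) n

theorem iterQ_succ_snoc (q : Int) : ∀ (n : Nat) (d : Int),
    iterQ q d (n + 1) = PySem.Int.floordiv (iterQ q d n) q := by
  intro n
  induction n with
  | zero => intro d; rfl
  | succ k ih => intro d; simpa [iterQ] using ih (PySem.Int.floordiv d q)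

theorem digitsLow_succ_snoc (q : Int) : ∀ (n : Nat) (d : Int),
    digitsLow q d (n + 1) = digitsLow q d n ++ [PySem.Int.mod (iterQ q d n) q] := by
  intro n
  induction n with
  | zero => intro d; rfl
  | succ k ih =>
    intro d
    have h1 : digitsLow q d (k+1+1)
        = PySem.Int.mod d q :: digitsLow q (PySem.Int.floordiv d q) (k+1) := rfl
    have h2 : digitsLow q d (k+1)
        = PySem.Int.mod d q :: digitsLow q (PySem.Int.floordiv d q) k := rfl
    have h3 : iterQ q d (k+1) = iterQ q (PySem.Int.floordiv d q) k := rfl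
    rw [h1, ih, h2, h3, List.cons_append]

theorem iterQ_add (q : Int) : ∀ (k : Nat) (j : Nat) (d : Int),
    iterQ q d (k + j) = iterQ q (iterQ q d k) j := by
  intro k
  induction k with
  | zero => intro j d; simp [iterQ]
  | succ t ih =>
    intro j d
    have h : t + 1 + j = (t + j) + 1 := by omega
    rw [h]
    show iterQ q (PySem.Int.floordiv d q) (t + j) = _
    rw [ih j (PySem.Int.floordiv d q)]
    rfl

theorem digitsLow_add (q : Int) : ∀ (k : Nat) (j : Nat) (d : Int),
    digitsLow q d (k + j) = digitsLow q d k ++ digitsLow q (iterQ q d k) j := by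
  intro k
  induction k with
  | zero => intro j d; simp [digitsLow, iterQ]
  | succ t ih =>
    intro j d
    have h : t + 1 + j = (t + j) + 1 := by omega
    rw [h]
    show PySem.Int.mod d q :: digitsLow q (PySem.Int.floordiv d q) (t + j) = _
    rw [ih j (PySem.Int.floordiv d q)]
    rfl

-- B's recursion computes the reversed low digits and the iterated quotient.
theorem goB_spec (q : Int) : ∀ (n : Nat) (d : Int),
    goB q d n = ((digitsLow q d n).reverse, iterQ q d n) := by
  intro n
  induction n using Nat.strong_induction_on with
  | _ n ih =>
    intro d
    unfold goB
    by_cases h0 : n = 0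
    · subst h0; simp [digitsLow, iterQ]
    · by_cases h1 : n = 1
      · subst h1; simp [digitsLow, iterQ]
      · rw [if_neg h0, if_neg h1]
        have hk1 : n / 2 < n := by omega
        have hk2 : n - n / 2 < n := by omega
        simp only [ih _ hk1, ih _ hk2]
        have hsplit : n = n / 2 + (n - n / 2) := by omega
        rw [Prod.mk.injEq]
        refine ⟨?_, ?_⟩
        · conv_rhs => rw [hsplit]
          rw [digitsLow_add, List.reverse_append]
        · conv_rhs => rw [hsplit]
          rw [iterQ_add]

-- A's loop invariant: after iterating i = 1..j the suffix of length j holds the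
-- first j digits in reversed order, and the quotient has been divided j times.
theorem afold (q : Int) (n : Nat) (decim : Int) :
    ∀ (j : Nat), j ≤ n →
    (PySem.List.pyRange 1 ((j : Int) + 1) 1).foldl
      (fun (st : List Int × Int) i =>
        (st.1.set ((n : Int) - i).toNat (PySem.Int.mod st.2 q), PySem.Int.floordiv st.2 q))
      (List.replicate n 0, decim)
      = (List.replicate (n - j) 0 ++ (digitsLow q decim j).reverse, iterQ q decim j) := by
  intro j
  induction j with
  | zero =>
    intro _
    rw [PySem.List.pyRange_one_eq_nil (by omega)]
    simp [digitsLow, iterQ]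
  | succ k ih =>
    intro hk
    have hk' : k ≤ n := by omega
    have hsplit := PySem.List.pyRange_one_succ_right (a := 1) (b := (k : Int) + 1) (by omega)
    push_cast
    rw [hsplit, List.foldl_append, ih hk']
    simp only [List.foldl_cons, List.foldl_nil]
    have hidx : ((n : Int) - ((k : Int) + 1)).toNat = n - k - 1 := by omega
    have hrep : List.replicate (n - k) (0 : Int)
        = List.replicate (n - k - 1) 0 ++ [0] := by
      rw [← List.replicate_succ']
      congr 1
      omega
    rw [Prod.mk.injEq]
    refine ⟨?_, ?_⟩
    · rw [hidx, hrep]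
      rw [List.append_assoc, List.set_append]
      simp only [List.length_replicate]
      rw [if_neg (by omega)]
      have h0 : (n - k - 1) - (n - k - 1) = 0 := by omega
      rw [h0]
      simp [digitsLow_succ_snoc, List.set_cons_zero]
      omega
    · simp [iterQ_succ_snoc]

-- the Array fold of port A, projected to lists
theorem foldA_toList (q c : Int) (l : List Int) : ∀ (arr : Array Int) (d : Int),
    (l.foldl (fun (st : Array Int × Int) i =>
        (st.1.setIfInBounds (c - i).toNat (PySem.Int.mod st.2 q), PySem.Int.floordiv st.2 q))
      (arr, d)).1.toList
    = (l.foldl (fun (st : List Int × Int) i =>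
        (st.1.set (c - i).toNat (PySem.Int.mod st.2 q), PySem.Int.floordiv st.2 q))
      (arr.toList, d)).1 := by
  induction l with
  | nil => intro arr d; rfl
  | cons x xs ih =>
    intro arr d
    simp only [List.foldl_cons]
    rw [ih]
    rw [Array.toList_setIfInBounds]

theorem ab_eq (decim m q : Int) :
    decimal_to_m_plus_one_vector decim m q = decimal_to_m_plus_one_vector_alt decim m q := by
  simp only [decimal_to_m_plus_one_vector, decimal_to_m_plus_one_vector_alt]
  rw [foldA_toList q (m + 1), Array.toList_replicate, goB_spec]
  show ((PySem.List.pyRange 1 (m + 2) 1).foldl _ (List.replicate (m + 1).toNat 0, decim)).1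
      = (digitsLow q decim (m + 1).toNat).reverse
  by_cases hm : m + 1 ≤ 0
  · have h0 : (m + 1).toNat = 0 := by omega
    rw [PySem.List.pyRange_one_eq_nil (by omega), h0]
    simp [digitsLow]
  · have hcast : m + 1 = (((m + 1).toNat : Nat) : Int) := by omega
    have h2 : m + 2 = (((m + 1).toNat : Nat) : Int) + 1 := by omega
    rw [h2, hcast]
    simp only [Int.toNat_natCast]
    rw [afold q (m + 1).toNat decim (m + 1).toNat (le_refl _)]
    simp

-- ===== VERDICT (by name: the statement is the Claim_ definition above) =====
theorem decimal_to_m_plus_one_vector_spec : Claim_equal_decimal_to_m_plus_one_vector := by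
  intro decim m q _ _
  unfold Spec_decimal_to_m_plus_one_vector
  exact ab_eq decim m q
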